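-- pv_equiv track=rewrite | github.com/cheng-wei-huang0612/Falcon_KeyGen | Size_estimation/Poly.py | NegaCyclic_Conv
-- ===== SOURCE A (Python) =====
-- def Linear_Conv(f,g,p):
--     if p != 0:
--
--         n = len(f)
--         result = [0]*(2*n-1)
--         for i in range(n):
--             for j in range(n):
--                 result[i+j] += (f[i]*g[j] % p)
--         return result
--
--     else:
--
--         n = len(f)
--         result = [0]*(2*n-1)
--         for i in range(n):
--             for j in range(n):
--                 result[i+j] += (f[i]*g[j])
--         return result
--
-- def NegaCyclic_Conv(f,g,p):
--     if p != 0: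
--
--         n = len(f)
--         result = Linear_Conv(f,g,p)
--         for i in range(n-1):
--             result[i] -= result[i+n] % p
--         return result[:n]
--
--     else:
--
--         n = len(f)
--         result = Linear_Conv(f,g,p)
--         for i in range(n-1):
--             result[i] -= result[i+n]
--         return result[:n]
-- ===== SOURCE B (Python) =====
-- def NegaCyclic_Conv(f, g, p):
--     # Gather form: each output coefficient is computed directly from its two
--     # diagonals, with no length-(2n-1) scratch buffer and no helper.
--     n = len(f)
--     out = []
--     for k in range(n):
--         if p != 0:
--             low = sum(f[i] * g[k - i] % p for i in range(k + 1))
--             if k < n - 1: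
--                 out.append(low - sum(f[i] * g[k + n - i] % p for i in range(k + 1, n)) % p)
--             else:
--                 out.append(low)
--         else:
--             low = sum(f[i] * g[k - i] for i in range(k + 1))
--             if k < n - 1:
--                 out.append(low - sum(f[i] * g[k + n - i] for i in range(k + 1, n)))
--             else:
--                 out.append(low)
--     return out
-- ===== Notes on version B (the rewrite author's own statement) =====
-- stated objective: alternative
-- what changed: Replaces the scatter into a length-(2n-1) linear-convolution buffer (Linear_Conv helper) plus an in-place wrap-subtraction pass with a direct gather: each output coefficient k is computed in one shot as the sum over its low diagonal minus the reduced sum over its wrap diagonal.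
import Mathlib
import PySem

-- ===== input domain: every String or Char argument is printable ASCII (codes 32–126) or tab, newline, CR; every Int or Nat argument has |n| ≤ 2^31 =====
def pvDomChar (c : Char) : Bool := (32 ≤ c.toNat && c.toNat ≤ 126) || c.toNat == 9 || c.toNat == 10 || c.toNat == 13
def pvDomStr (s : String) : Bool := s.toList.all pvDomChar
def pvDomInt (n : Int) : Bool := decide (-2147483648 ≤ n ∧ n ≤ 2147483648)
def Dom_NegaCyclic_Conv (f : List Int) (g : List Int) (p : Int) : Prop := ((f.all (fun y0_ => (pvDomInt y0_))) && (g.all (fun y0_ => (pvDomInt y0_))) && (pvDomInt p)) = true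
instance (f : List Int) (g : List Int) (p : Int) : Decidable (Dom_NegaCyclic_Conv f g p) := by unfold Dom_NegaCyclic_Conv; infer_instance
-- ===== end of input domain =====

-- B replaces A's scatter into a length-(2n-1) Linear_Conv buffer plus an in-place
-- wrap-subtraction pass by a direct per-coefficient gather over the two diagonals
-- (objective: alternative decomposition, same O(n^2) cost).

-- ===== PORT A =====
-- Indexing is via List.getD 0: under Pre_ every index accessed is in range, so this
-- agrees with Python's f[i] / g[j] / result[i+j] exactly.
def Linear_Conv (f : List Int) (g : List Int) (p : Int) : List Int :=
  if p ≠ 0 then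
    let n := f.length
    (List.range n).foldl (fun res i =>
      (List.range n).foldl (fun r j =>
        r.set (i+j) (r.getD (i+j) 0 + PySem.Int.mod (f.getD i 0 * g.getD j 0) p)) res)
      (List.replicate (2*n-1) 0)
  else
    let n := f.length
    (List.range n).foldl (fun res i =>
      (List.range n).foldl (fun r j =>
        r.set (i+j) (r.getD (i+j) 0 + f.getD i 0 * g.getD j 0)) res)
      (List.replicate (2*n-1) 0)

def NegaCyclic_Conv (f : List Int) (g : List Int) (p : Int) : List Int :=
  if p ≠ 0 then
    let n := f.length
    let result := Linear_Conv f g p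
    ((List.range (n-1)).foldl (fun r i =>
        r.set i (r.getD i 0 - PySem.Int.mod (r.getD (i+n) 0) p)) result).take n
  else
    let n := f.length
    let result := Linear_Conv f g p
    ((List.range (n-1)).foldl (fun r i =>
        r.set i (r.getD i 0 - r.getD (i+n) 0)) result).take n

-- ===== PORT B =====
def NegaCyclic_Conv_alt (f : List Int) (g : List Int) (p : Int) : List Int :=
  let n := f.length
  (List.range n).map (fun k =>
    if p ≠ 0 then
      let low := (List.range (k+1)).foldl
        (fun s i => s + PySem.Int.mod (f.getD i 0 * g.getD (k-i) 0) p) 0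
      if k < n-1 then
        low - PySem.Int.mod ((List.range' (k+1) (n-(k+1))).foldl
          (fun s i => s + PySem.Int.mod (f.getD i 0 * g.getD (k+n-i) 0) p) 0) p
      else low
    else
      let low := (List.range (k+1)).foldl
        (fun s i => s + f.getD i 0 * g.getD (k-i) 0) 0
      if k < n-1 then
        low - (List.range' (k+1) (n-(k+1))).foldl
          (fun s i => s + f.getD i 0 * g.getD (k+n-i) 0) 0
      else low)

-- ===== PRECONDITION & SPEC =====
-- Pre_ excludes exactly the inputs where Python A raises IndexError: g shorter than f
-- (A reads g[j] for every j < len(f)).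
def Pre_NegaCyclic_Conv (f : List Int) (g : List Int) (p : Int) : Prop :=
  f.length ≤ g.length

instance (f : List Int) (g : List Int) (p : Int) : Decidable (Pre_NegaCyclic_Conv f g p) := by
  unfold Pre_NegaCyclic_Conv; infer_instance

def pvWitness_NegaCyclic_Conv : List Int × List Int × Int := ([1, 2, 3], [4, -5, 6], 7)

def Spec_NegaCyclic_Conv (f : List Int) (g : List Int) (p : Int) (out : List Int) : Prop := out = NegaCyclic_Conv_alt f g p
instance (f : List Int) (g : List Int) (p : Int) (out : List Int) : Decidable (Spec_NegaCyclic_Conv f g p out) := by unfold Spec_NegaCyclic_Conv; infer_instance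

-- ===== CLAIM (what is proved, stated in full; the proofs are below) =====
def Claim_equal_NegaCyclic_Conv : Prop := ∀ (f : List Int) (g : List Int) (p : Int), Dom_NegaCyclic_Conv f g p → Pre_NegaCyclic_Conv f g p → Spec_NegaCyclic_Conv f g p (NegaCyclic_Conv f g p)

-- ===== LEMMAS AND PROOFS =====

lemma pv_length_foldl {β : Type} (F : List Int → β → List Int)
    (h : ∀ r b, (F r b).length = r.length) :
    ∀ (l : List β) (res : List Int), (l.foldl F res).length = res.length := by
  intro l
  induction l with
  | nil => intro res; rfl
  | cons b t ih => intro res; rw [List.foldl_cons, ih, h]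

lemma pv_getD_set (res : List Int) (idx m : Nat) (w : Int) (h : idx < res.length) :
    (res.set idx w).getD m 0 = if idx = m then w else res.getD m 0 := by
  by_cases hm : idx = m
  · subst hm; simp [List.getD, List.getElem?_set, h]
  · simp [List.getD, List.getElem?_set, hm]

lemma pv_inner (t : Nat → Nat → Int) (i : Nat) :
    ∀ (K : Nat) (res : List Int), (∀ j, j < K → i + j < res.length) → ∀ m,
    ((List.range K).foldl (fun r j => r.set (i+j) (r.getD (i+j) 0 + t i j)) res).getD m 0
      = res.getD m 0 + ∑ j ∈ Finset.range K, if i + j = m then t i j else 0 := by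
  intro K
  induction K with
  | zero => intro res _ m; simp
  | succ K ih =>
    intro res hres m
    rw [List.range_succ, List.foldl_append, List.foldl_cons, List.foldl_nil]
    have hlen : ((List.range K).foldl (fun r j => r.set (i+j) (r.getD (i+j) 0 + t i j)) res).length = res.length :=
      pv_length_foldl _ (by intro r b; simp) _ _
    rw [pv_getD_set _ _ _ _ (by rw [hlen]; exact hres K (Nat.lt_succ_self K))]
    rw [ih res (fun j hj => hres j (Nat.lt_succ_of_lt hj)) m,
        ih res (fun j hj => hres j (Nat.lt_succ_of_lt hj)) (i+K),
        Finset.sum_range_succ]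
    have hz : (∑ j ∈ Finset.range K, if i + j = i + K then t i j else 0) = 0 := by
      apply Finset.sum_eq_zero
      intro j hj
      rw [if_neg (by simp at hj; omega)]
    by_cases hm : i + K = m
    · rw [if_pos hm, hz, ← hm, hz]
      rw [if_pos rfl]
      ring
    · rw [if_neg hm, if_neg hm, add_zero]

lemma pv_outer (t : Nat → Nat → Int) (K : Nat) :
    ∀ (N : Nat) (res : List Int), (∀ i j, i < N → j < K → i + j < res.length) → ∀ m,
    ((List.range N).foldl (fun r i => (List.range K).foldl (fun r' j => r'.set (i+j) (r'.getD (i+j) 0 + t i j)) r) res).getD m 0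
      = res.getD m 0 + ∑ i ∈ Finset.range N, ∑ j ∈ Finset.range K, if i + j = m then t i j else 0 := by
  intro N
  induction N with
  | zero => intro res _ m; simp
  | succ N ih =>
    intro res hres m
    rw [List.range_succ, List.foldl_append, List.foldl_cons, List.foldl_nil]
    have hlen : ((List.range N).foldl (fun r i => (List.range K).foldl (fun r' j => r'.set (i+j) (r'.getD (i+j) 0 + t i j)) r) res).length = res.length :=
      pv_length_foldl _ (fun r b => pv_length_foldl _ (by intro r' j; simp) _ _) _ _
    rw [pv_inner t N K _ (by intro j hj; rw [hlen]; exact hres N j (Nat.lt_succ_self N) hj) m]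
    rw [ih res (fun i j hi hj => hres i j (Nat.lt_succ_of_lt hi) hj) m]
    rw [Finset.sum_range_succ]
    ring

lemma pv_getD_replicate (n m : Nat) : (List.replicate n (0:Int)).getD m 0 = 0 := by
  by_cases h : m < n <;> simp [List.getD, List.getElem?_replicate, h]

lemma pv_lin (t : Nat → Nat → Int) (n m : Nat) :
    ((List.range n).foldl (fun res i => (List.range n).foldl (fun r j => r.set (i+j) (r.getD (i+j) 0 + t i j)) res) (List.replicate (2*n-1) 0)).getD m 0
      = ∑ i ∈ Finset.range n, ∑ j ∈ Finset.range n, if i + j = m then t i j else 0 := by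
  rw [pv_outer t n n _ (by intro i j hi hj; simp [List.length_replicate]; omega) m,
      pv_getD_replicate, zero_add]

lemma pv_subloop (q : Int → Int) (n : Nat) (L : List Int) (hL : L.length = 2*n-1) :
    ∀ (K : Nat), K ≤ n-1 → ∀ m,
    ((List.range K).foldl (fun r i => r.set i (r.getD i 0 - q (r.getD (i+n) 0))) L).getD m 0
      = if m < K then L.getD m 0 - q (L.getD (m+n) 0) else L.getD m 0 := by
  intro K
  induction K with
  | zero => intro _ m; simp
  | succ K ih =>
    intro hK m
    have hK' : K ≤ n - 1 := by omega
    rw [List.range_succ, List.foldl_append, List.foldl_cons, List.foldl_nil]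
    have hlen : ((List.range K).foldl (fun r i => r.set i (r.getD i 0 - q (r.getD (i+n) 0))) L).length = L.length :=
      pv_length_foldl _ (by intro r b; simp) _ _
    rw [pv_getD_set _ _ _ _ (by rw [hlen, hL]; omega)]
    by_cases hm : K = m
    · subst hm
      rw [if_pos rfl, ih hK' K, ih hK' (K+n),
          if_neg (show ¬ K < K by omega), if_neg (show ¬ K + n < K by omega),
          if_pos (show K < K + 1 by omega)]
    · rw [if_neg hm, ih hK' m]
      by_cases hm2 : m < K
      · rw [if_pos hm2, if_pos (show m < K + 1 by omega)]
      · rw [if_neg hm2, if_neg (show ¬ m < K + 1 by omega)]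

lemma pv_foldl_add (h : Nat → Int) : ∀ (K : Nat) (init : Int),
    (List.range K).foldl (fun s i => s + h i) init = init + ∑ i ∈ Finset.range K, h i := by
  intro K
  induction K with
  | zero => intro init; simp
  | succ K ih =>
    intro init
    rw [List.range_succ, List.foldl_append, List.foldl_cons, List.foldl_nil, ih,
        Finset.sum_range_succ]
    ring

lemma pv_foldl_add' (h : Nat → Int) :
    ∀ (b a : Nat) (init : Int),
    (List.range' a b).foldl (fun s i => s + h i) init = init + ∑ i ∈ Finset.Ico a (a+b), h i := by
  intro b
  induction b with
  | zero => intro a init; simp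
  | succ b ih =>
    intro a init
    rw [List.range'_succ, List.foldl_cons, ih]
    rw [show a + (b + 1) = a + 1 + b from by omega,
        Finset.sum_eq_sum_Ico_succ_bot (show a < a + 1 + b by omega) h]
    ring

lemma pv_low (t : Nat → Nat → Int) (n k : Nat) (hk : k < n) :
    (∑ i ∈ Finset.range n, ∑ j ∈ Finset.range n, if i + j = k then t i j else 0)
      = ∑ i ∈ Finset.range (k+1), t i (k-i) := by
  have h1 : ∀ i ∈ Finset.range n, (∑ j ∈ Finset.range n, if i + j = k then t i j else 0)
      = if i < k+1 then t i (k-i) else 0 := by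
    intro i hi
    by_cases hik : i ≤ k
    · have h2 : (∑ j ∈ Finset.range n, if i + j = k then t i j else 0)
          = ∑ j ∈ Finset.range n, if j = k - i then t i j else 0 := by
        apply Finset.sum_congr rfl
        intro j _
        by_cases hj : i + j = k
        · rw [if_pos hj, if_pos (by omega)]
        · rw [if_neg hj, if_neg (by omega)]
      rw [h2, Finset.sum_ite_eq' (Finset.range n) (k-i) (fun j => t i j)]
      rw [if_pos (Finset.mem_range.mpr (by omega)), if_pos (by omega)]
    · rw [if_neg (by omega)]
      apply Finset.sum_eq_zero
      intro j _
      rw [if_neg (by omega)]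
  rw [Finset.sum_congr rfl h1]
  rw [← Finset.sum_subset (show Finset.range (k+1) ⊆ Finset.range n by
        intro x hx; simp at hx ⊢; omega)
      (by intro x hx hnx; rw [if_neg (by simp at hnx; omega)])]
  apply Finset.sum_congr rfl
  intro i hi
  rw [if_pos (Finset.mem_range.mp hi)]

lemma pv_high (t : Nat → Nat → Int) (n k : Nat) (hk : k < n - 1) :
    (∑ i ∈ Finset.range n, ∑ j ∈ Finset.range n, if i + j = k + n then t i j else 0)
      = ∑ i ∈ Finset.Ico (k+1) n, t i (k+n-i) := by
  have h1 : ∀ i ∈ Finset.range n, (∑ j ∈ Finset.range n, if i + j = k + n then t i j else 0)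
      = if k+1 ≤ i then t i (k+n-i) else 0 := by
    intro i hi
    rw [Finset.mem_range] at hi
    by_cases hik : k + 1 ≤ i
    · have h2 : (∑ j ∈ Finset.range n, if i + j = k + n then t i j else 0)
          = ∑ j ∈ Finset.range n, if j = k + n - i then t i j else 0 := by
        apply Finset.sum_congr rfl
        intro j _
        by_cases hj : i + j = k + n
        · rw [if_pos hj, if_pos (by omega)]
        · rw [if_neg hj, if_neg (by omega)]
      rw [h2, Finset.sum_ite_eq' (Finset.range n) (k+n-i) (fun j => t i j)]
      rw [if_pos (Finset.mem_range.mpr (by omega)), if_pos hik]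
    · rw [if_neg hik]
      apply Finset.sum_eq_zero
      intro j hj
      rw [Finset.mem_range] at hj
      rw [if_neg (by omega)]
  rw [Finset.sum_congr rfl h1, Finset.range_eq_Ico,
      ← Finset.sum_Ico_consecutive _ (by omega : 0 ≤ k+1) (by omega : k+1 ≤ n)]
  have h0 : (∑ i ∈ Finset.Ico 0 (k+1), if k+1 ≤ i then t i (k+n-i) else 0) = 0 := by
    apply Finset.sum_eq_zero
    intro i hi
    rw [Finset.mem_Ico] at hi
    rw [if_neg (by omega)]
  rw [h0, zero_add]
  apply Finset.sum_congr rfl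
  intro i hi
  rw [Finset.mem_Ico] at hi
  rw [if_pos hi.1]

lemma pv_combined (t : Nat → Nat → Int) (q : Int → Int) (n : Nat) :
    (((List.range (n-1)).foldl (fun r i => r.set i (r.getD i 0 - q (r.getD (i+n) 0)))
       ((List.range n).foldl (fun res i => (List.range n).foldl (fun r j => r.set (i+j) (r.getD (i+j) 0 + t i j)) res) (List.replicate (2*n-1) 0))).take n)
    = (List.range n).map (fun k =>
        if k < n-1 then (∑ i ∈ Finset.range (k+1), t i (k-i)) - q (∑ i ∈ Finset.Ico (k+1) n, t i (k+n-i))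
        else ∑ i ∈ Finset.range (k+1), t i (k-i)) := by
  have hLlen : ((List.range n).foldl (fun res i => (List.range n).foldl (fun r j => r.set (i+j) (r.getD (i+j) 0 + t i j)) res) (List.replicate (2*n-1) 0)).length = 2*n-1 := by
    rw [pv_length_foldl _ (fun r b => pv_length_foldl _ (by intro r' j; simp) _ _) _ _,
        List.length_replicate]
  have hSlen : (((List.range (n-1)).foldl (fun r i => r.set i (r.getD i 0 - q (r.getD (i+n) 0)))
       ((List.range n).foldl (fun res i => (List.range n).foldl (fun r j => r.set (i+j) (r.getD (i+j) 0 + t i j)) res) (List.replicate (2*n-1) 0)))).length = 2*n-1 := by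
    rw [pv_length_foldl _ (by intro r b; simp) _ _, hLlen]
  apply List.ext_getElem
  · rw [List.length_take, hSlen, List.length_map, List.length_range]; omega
  · intro k hk1 hk2
    rw [List.length_take, hSlen] at hk1
    have hkn : k < n := by omega
    rw [List.getElem_take, List.getElem_map, List.getElem_range]
    rw [← List.getD_eq_getElem _ 0 (by rw [hSlen]; omega)]
    rw [pv_subloop q n _ hLlen (n-1) (le_refl _) k]
    by_cases hc : k < n - 1
    · rw [if_pos hc, if_pos hc, pv_lin, pv_lin, pv_low t n k hkn, pv_high t n k hc]
    · rw [if_neg hc, if_neg hc, pv_lin, pv_low t n k hkn]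

-- ===== VERDICT (by name: the statement is the Claim_ definition above) =====
theorem NegaCyclic_Conv_spec : Claim_equal_NegaCyclic_Conv := by
  intro f g p _ _
  unfold Spec_NegaCyclic_Conv NegaCyclic_Conv NegaCyclic_Conv_alt Linear_Conv
  by_cases hp : p ≠ 0
  · rw [if_pos hp, if_pos hp]
    rw [pv_combined (fun i j => PySem.Int.mod (f.getD i 0 * g.getD j 0) p) (fun x => PySem.Int.mod x p) f.length]
    apply List.map_congr_left
    intro k hk
    rw [List.mem_range] at hk
    rw [if_pos hp]
    rw [pv_foldl_add (fun i => PySem.Int.mod (f.getD i 0 * g.getD (k-i) 0) p) (k+1) 0, zero_add]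
    by_cases hc : k < f.length - 1
    · rw [if_pos hc, if_pos hc]
      rw [pv_foldl_add' (fun i => PySem.Int.mod (f.getD i 0 * g.getD (k+f.length-i) 0) p) (f.length-(k+1)) (k+1) 0, zero_add]
      rw [show k+1+(f.length-(k+1)) = f.length from by omega]
    · rw [if_neg hc, if_neg hc]
  · rw [if_neg hp, if_neg hp]
    rw [pv_combined (fun i j => f.getD i 0 * g.getD j 0) (fun x => x) f.length]
    apply List.map_congr_left
    intro k hk
    rw [List.mem_range] at hk
    rw [if_neg hp]
    rw [pv_foldl_add (fun i => f.getD i 0 * g.getD (k-i) 0) (k+1) 0, zero_add]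
    by_cases hc : k < f.length - 1
    · rw [if_pos hc, if_pos hc]
      rw [pv_foldl_add' (fun i => f.getD i 0 * g.getD (k+f.length-i) 0) (f.length-(k+1)) (k+1) 0, zero_add]
      rw [show k+1+(f.length-(k+1)) = f.length from by omega]
    · rw [if_neg hc, if_neg hc]
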